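-- pv_equiv track=rewrite | github.com/mohvem/random-walks | markov.py | calc_substr
-- ===== SOURCE A (Python) =====
-- def calc_substr(text, lookfwd_num):
--     '''
--     This function takes a given string and outputs all the substrings
--     according to Markov logic in a list
--
--     Input: Text and number to create k-length substrings of.
--
--     Output: List of substrings of length lookfwd_num
--     '''
--     all_strings = []
--     for index, substr in enumerate(text):
--         out_str = ''
--         # Case 1: Will reach end of text and need to loop around to front
--         if index + lookfwd_num - 1 > len(text) - 1:
--             # Add what is left of string
--             out_str += text[index:]
--             # Loop back around for rest
--             out_str += text[:(lookfwd_num - len(text[index:]))]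
--         # Case 2: Have enough string, just go lookfwd_num forward from current
--         else:
--             out_str += text[index:(index+lookfwd_num)]
--         all_strings.append(out_str)
--     return all_strings
-- ===== SOURCE B (Python) =====
-- def calc_substr(text, lookfwd_num):
--     '''Same substrings via one precomputed doubled string: no wrap-around branch.'''
--     doubled = text * 2
--     return [doubled[i:i + lookfwd_num] for i in range(len(text))]
-- ===== Notes on version B (the rewrite author's own statement) =====
-- stated objective: simpler
-- what changed: Replaces the per-index wrap-around branch (conditional concatenation of a tail slice and a head slice) by one precomputed doubled string and a single uniform slice per index.
-- outside the precondition, e.g. on calc_substr('abc', -1): A returns ['ab', '', ''], B returns ['abcab', '', '']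
import Mathlib
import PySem

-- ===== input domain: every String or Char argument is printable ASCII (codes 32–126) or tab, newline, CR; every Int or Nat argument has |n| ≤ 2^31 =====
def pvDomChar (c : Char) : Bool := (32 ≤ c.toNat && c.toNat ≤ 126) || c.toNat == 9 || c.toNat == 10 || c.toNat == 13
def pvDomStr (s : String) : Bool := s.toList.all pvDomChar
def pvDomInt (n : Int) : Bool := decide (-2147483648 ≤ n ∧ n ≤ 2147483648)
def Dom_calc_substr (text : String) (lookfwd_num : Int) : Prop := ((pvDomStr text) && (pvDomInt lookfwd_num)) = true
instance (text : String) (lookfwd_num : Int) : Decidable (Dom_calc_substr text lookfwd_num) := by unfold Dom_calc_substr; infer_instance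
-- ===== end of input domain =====

-- B replaces A's per-index wrap-around branch by one precomputed doubled string and a single uniform slice (objective: simpler).

-- ===== PORT A =====
def calc_substr (text : String) (lookfwd_num : Int) : List String :=
  let t := text.toList
  (PySem.List.enumerate t 0).foldl
    (fun all_strings p =>
      let index := p.1
      let out_str : List Char :=
        if index + lookfwd_num - 1 > (t.length : Int) - 1 then
          -- out_str += text[index:]; out_str += text[:(lookfwd_num - len(text[index:]))]
          PySem.List.slice t (some index) none ++
            PySem.List.slice t none
              (some (lookfwd_num - ((PySem.List.slice t (some index) none).length : Int)))
        else
          PySem.List.slice t (some index) (some (index + lookfwd_num))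
      all_strings ++ [String.ofList out_str])
    []

-- ===== PORT B =====
def calc_substr_alt (text : String) (lookfwd_num : Int) : List String :=
  let t := text.toList
  let doubled := t ++ t
  (PySem.List.pyRange 0 (t.length : Int) 1).map
    (fun i => String.ofList (PySem.List.slice doubled (some i) (some (i + lookfwd_num))))

-- ===== PRECONDITION & SPEC =====
-- Pre_ excludes only the malformed negative lengths with -2*len(text) < lookfwd_num < 0 on nonempty text,
-- where Python's negative slice stop counts from the end of the sliced string, so A (slicing text) and
-- B (slicing the doubled text) defensibly disagree; all other inputs (incl. lookfwd_num <= -2*len) are claimed.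
def Pre_calc_substr (text : String) (lookfwd_num : Int) : Prop :=
  0 ≤ lookfwd_num ∨ lookfwd_num + 2 * (text.toList.length : Int) ≤ 0
instance (text : String) (lookfwd_num : Int) : Decidable (Pre_calc_substr text lookfwd_num) := by unfold Pre_calc_substr; infer_instance
def pvWitness_calc_substr : String × Int := ("abc", 2)

def Spec_calc_substr (text : String) (lookfwd_num : Int) (out : List String) : Prop := out = calc_substr_alt text lookfwd_num
instance (text : String) (lookfwd_num : Int) (out : List String) : Decidable (Spec_calc_substr text lookfwd_num out) := by unfold Spec_calc_substr; infer_instance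

-- ===== CLAIM (what is proved, stated in full; the proofs are below) =====
def Claim_equal_calc_substr : Prop := ∀ (text : String) (lookfwd_num : Int), Dom_calc_substr text lookfwd_num → Pre_calc_substr text lookfwd_num → Spec_calc_substr text lookfwd_num (calc_substr text lookfwd_num)

-- ===== LEMMAS AND PROOFS =====

-- per-index agreement on the List Char level
lemma pv_clampIdx_le_of (n : Nat) (a : Int) (x : Nat) (_h1 : a ≤ (x : Int))
    (h2 : a + (n : Int) ≤ (x : Int)) : PySem.List.clampIdx n a ≤ x := by
  simp only [PySem.List.clampIdx]; split_ifs <;> omega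

lemma pv_clampIdx_of_nonneg_le (n : Nat) (a : Int) (h0 : 0 ≤ a) (h : a ≤ (n : Int)) :
    PySem.List.clampIdx n a = a.toNat := by
  simp only [PySem.List.clampIdx]; split_ifs <;> omega

lemma per_index_eq (t : List Char) (k : Int)
    (hk : 0 ≤ k ∨ k + 2 * (t.length : Int) ≤ 0) (i : Int)
    (hi0 : 0 ≤ i) (hin : i < (t.length : Int)) :
    (if i + k - 1 > (t.length : Int) - 1 then
        PySem.List.slice t (some i) none ++
          PySem.List.slice t none (some (k - ((PySem.List.slice t (some i) none).length : Int)))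
      else
        PySem.List.slice t (some i) (some (i + k)))
    = PySem.List.slice (t ++ t) (some i) (some (i + k)) := by
  rcases hk with hk | hk
  · -- 0 ≤ k: the substring really is text[i:i+k] of the doubled text
    have hik : 0 ≤ i + k := by omega
    rw [PySem.List.slice_toNat (t ++ t) hi0 hik]
    have htoNat : (i + k).toNat = i.toNat + k.toNat := by omega
    rw [htoNat, Nat.add_sub_cancel_left, List.drop_append_of_le_length (by omega),
      List.take_append]
    split_ifs with h
    · -- wrap case: i + k > length
      rw [PySem.List.slice_from t hi0]
      have hL : (List.drop i.toNat t).length = t.length - i.toNat := by simp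
      have hrest : 0 ≤ k - ((List.drop i.toNat t).length : Int) := by rw [hL]; omega
      rw [PySem.List.slice_to t hrest]
      have h1 : List.take k.toNat (List.drop i.toNat t) = List.drop i.toNat t :=
        List.take_of_length_le (by rw [hL]; omega)
      have h2 : (k - ((List.drop i.toNat t).length : Int)).toNat
          = k.toNat - (List.drop i.toNat t).length := by rw [hL]; omega
      rw [h1, h2]
    · -- no-wrap case: i + k ≤ length
      rw [PySem.List.slice_toNat t hi0 hik, htoNat, Nat.add_sub_cancel_left]
      have h0 : k.toNat - (List.drop i.toNat t).length = 0 := by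
        simp only [List.length_drop]; omega
      rw [h0, List.take_zero, List.append_nil]
  · -- k ≤ -2*len: every substring is empty in both programs
    rw [if_neg (by omega)]
    have e1 : PySem.List.slice t (some i) (some (i + k)) = [] := by
      apply List.eq_nil_of_length_eq_zero
      rw [PySem.List.length_slice]
      have h3 := pv_clampIdx_le_of t.length (i + k) i.toNat (by omega) (by omega)
      have h4 := pv_clampIdx_of_nonneg_le t.length i hi0 (by omega)
      omega
    have e2 : PySem.List.slice (t ++ t) (some i) (some (i + k)) = [] := by
      apply List.eq_nil_of_length_eq_zero
      rw [PySem.List.length_slice]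
      have h3 := pv_clampIdx_le_of (t ++ t).length (i + k) i.toNat (by omega)
        (by simp only [List.length_append]; push_cast; omega)
      have h4 := pv_clampIdx_of_nonneg_le (t ++ t).length i hi0
        (by simp only [List.length_append]; push_cast; omega)
      omega
    rw [e1, e2]

-- ===== VERDICT (by name: the statement is the Claim_ definition above) =====
theorem calc_substr_spec : Claim_equal_calc_substr := by
  intro text k _ hk
  unfold Pre_calc_substr at hk
  unfold Spec_calc_substr calc_substr calc_substr_alt
  simp only []
  rw [PySem.List.foldl_append_singleton_eq_map,
    PySem.List.enumerate_eq_map_pyRange text.toList ' ', List.map_map]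
  simp only [PySem.List.len, List.nil_append]
  apply List.map_congr_left
  intro j hj
  obtain ⟨hj0, hjn⟩ := PySem.List.mem_pyRange_one.mp hj
  simp only [Function.comp]
  exact congrArg String.ofList (per_index_eq text.toList k hk j hj0 hjn)
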